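-- pv_equiv track=rewrite | github.com/pokerdio/generic | e/e-581.py | gen_smooth
-- ===== SOURCE A (Python) =====
-- def listp(n):
--     sieve = list(range(n + 2))
--     ret = []
--     for i in range(2, n + 1):
--         if sieve[i] == i:
--             ret.append(i)
--             for j in range(i, n + 1, i):
--                 sieve[j] = i
--     return ret
--
-- def gen_smooth(n, p=47):
--     pv = listp(p)
--     v = [1]
--
--     for p in pv:
--         new = []
--         i = p
--         while i <= n:
--             for j in v:
--                 if j * i <= n:
--                     new.append(j * i)
--                 else:
--                     break
--             i *= p
--         v.extend(new)
--         v.sort()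
--     return v
-- ===== SOURCE B (Python) =====
-- def gen_smooth(n, p=47):
--     primes = []
--
--     def is_prime(q):
--         for r in primes:
--             if r * r > q:
--                 return True
--             if q % r == 0:
--                 return False
--         return True
--
--     q = 2
--     while q <= p:
--         if is_prime(q):
--             primes.append(q)
--         q += 1
--
--     def expand(i, val):
--         out = [val]
--         for j in range(i, len(primes)):
--             if val * primes[j] > n:
--                 break
--             out.extend(expand(j, val * primes[j]))
--         return out
--
--     return sorted(expand(0, 1))
-- ===== Notes on version B (the rewrite author's own statement) =====
-- stated objective: faster
-- what changed: B finds the primes by trial division with a sqrt cutoff instead of A's array sieve, and enumerates the smooth numbers once by recursive DFS over non-decreasing prime-index multiplications followed by a single sort, instead of A's per-prime generate/extend/re-sort passes.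
import Mathlib
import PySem

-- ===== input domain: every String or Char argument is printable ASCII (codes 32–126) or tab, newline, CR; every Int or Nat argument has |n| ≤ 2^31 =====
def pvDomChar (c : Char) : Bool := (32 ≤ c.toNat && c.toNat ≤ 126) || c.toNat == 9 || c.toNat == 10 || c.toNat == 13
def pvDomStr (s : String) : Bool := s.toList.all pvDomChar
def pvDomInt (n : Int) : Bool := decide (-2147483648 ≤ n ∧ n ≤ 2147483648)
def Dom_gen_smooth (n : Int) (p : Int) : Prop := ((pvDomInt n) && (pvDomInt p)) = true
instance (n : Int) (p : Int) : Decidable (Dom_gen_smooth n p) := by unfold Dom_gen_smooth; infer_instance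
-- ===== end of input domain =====

-- B re-implements gen_smooth by one recursive DFS generation of the smooth numbers plus a
-- single sort (primes by trial division with a sqrt cutoff) instead of A's sieve and
-- per-prime generate/extend/re-sort passes; equal return value on every input, and the
-- timing run measured B faster on its large generated inputs.

-- ===== PORT A =====
-- 'for j in range(i, n+1, i): sieve[j] = i' (every written index is in range, so pySetD is exact)
def listpMark (nn i : Int) (sieve : List Int) : List Int :=
  (PySem.List.pyRange i (nn + 1) i).foldl (fun s j => PySem.List.pySetD s j i) sieve

-- listp(n): sieve = list(range(n+2)); read 'sieve[i]' is always in range, so pyGetD is exact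
def listpA (nn : Int) : List Int :=
  ((PySem.List.pyRange 2 (nn + 1) 1).foldl
    (fun (st : List Int × List Int) i =>
      if PySem.List.pyGetD st.1 i 0 == i then (listpMark nn i st.1, st.2 ++ [i]) else st)
    (PySem.List.pyRange 0 (nn + 2) 1, ([] : List Int))).2

-- 'for j in v: if j*i <= n: new.append(j*i) else: break'
def innerA (v : List Int) (i n : Int) : List Int :=
  match v with
  | [] => []
  | j :: rest => if j * i ≤ n then j * i :: innerA rest i n else []

-- 'while i <= n: (inner loop); i *= p' — the conjuncts 2 ≤ q and 1 ≤ i only make the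
-- recursion total; they hold on every reachable call (q is an element of listp, i a power of q)
def powLoopA (v : List Int) (n q i : Int) : List Int :=
  if _h : 2 ≤ q ∧ 1 ≤ i ∧ i ≤ n then innerA v i n ++ powLoopA v n q (i * q) else []
termination_by (n + 1 - i).toNat
decreasing_by
  have := lt_mul_right (show (0:Int) < i by omega) (show (1:Int) < q by omega)
  omega

def gen_smooth (n : Int) (p : Int) : List Int :=
  (listpA p).foldl
    (fun v q => PySem.List.sorted (v ++ powLoopA v n q q) (fun x => x) false) [1]

-- ===== PORT B =====
-- B's is_prime(q): scan the primes found so far, stopping at the first r with r*r > q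
def trialOK (q : Int) : List Int → Bool
  | [] => true
  | r :: rest =>
    if r * r > q then true
    else if PySem.Int.mod q r == 0 then false
    else trialOK q rest

-- 'while q <= p: if is_prime(q): primes.append(q); q += 1'
def trialB (p q : Int) (primes : List Int) : List Int :=
  if _h : q ≤ p then
    if trialOK q primes
    then trialB p (q + 1) (primes ++ [q])
    else trialB p (q + 1) primes
  else primes
termination_by (p + 1 - q).toNat
decreasing_by all_goals omega

-- expand(i, val) = val :: tailB primes n i val (the part appended after the head);
-- Python breaks out of the j-loop as soon as val*primes[j] > n; the extra conjuncts
-- 1 ≤ val and 2 ≤ primes[i] only make the recursion total: they hold on every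
-- reachable call (val is a product of primes, each prime is ≥ 2)
def tailB (primes : List Int) (n : Int) (i : Nat) (val : Int) : List Int :=
  if h : i < primes.length then
    if c : val * primes[i] ≤ n ∧ 1 ≤ val ∧ 2 ≤ primes[i] then
      (val * primes[i] :: tailB primes n i (val * primes[i])) ++ tailB primes n (i + 1) val
    else []
  else []
termination_by ((n + 1 - val).toNat, primes.length - i)
decreasing_by
  · apply Prod.Lex.left
    have := lt_mul_right (show (0:Int) < val by omega) (show (1:Int) < primes[i] by omega)
    omega
  · apply Prod.Lex.right
    omega

-- return sorted(expand(0, 1))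
def gen_smooth_alt (n : Int) (p : Int) : List Int :=
  PySem.List.sorted (1 :: tailB (trialB p 2 []) n 0 1) (fun x => x) false

-- ===== PRECONDITION & SPEC =====
def Spec_gen_smooth (n : Int) (p : Int) (out : List Int) : Prop := out = gen_smooth_alt n p
instance (n : Int) (p : Int) (out : List Int) : Decidable (Spec_gen_smooth n p out) := by unfold Spec_gen_smooth; infer_instance

-- ===== CLAIM (what is proved, stated in full; the proofs are below) =====
def Claim_equal_gen_smooth : Prop := ∀ (n : Int) (p : Int), Dom_gen_smooth n p → Spec_gen_smooth n p (gen_smooth n p)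

-- ===== LEMMAS AND PROOFS =====

-- the common target: the primes of [2, c) in increasing order
def primesTo (c : Int) : List Int :=
  (PySem.List.pyRange 2 c 1).filter (fun q => decide q.toNat.Prime)

-- 'every prime factor of m lies in qs'
def SmoothOver (qs : List Int) (m : Int) : Prop :=
  ∀ r : Nat, r.Prime → (r : Int) ∣ m → (r : Int) ∈ qs

-- invariant of A's main loop: v is the strictly sorted list of qs-smooth numbers ≤ n (plus 1)
def InvA (n : Int) (qs : List Int) (v : List Int) : Prop :=
  v.Pairwise (· < ·) ∧ ∀ m : Int, m ∈ v ↔ (m = 1 ∨ (2 ≤ m ∧ m ≤ n ∧ SmoothOver qs m))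

theorem prime_iff_no_small_prime_dvd (q : Int) (hq : 2 ≤ q) :
    q.toNat.Prime ↔ ¬∃ r : Int, r.toNat.Prime ∧ 2 ≤ r ∧ r * r ≤ q ∧ r ∣ q := by
  constructor
  · rintro hp ⟨r, hrp, hr2, hrr, hrd⟩
    have hdvd : r.toNat ∣ q.toNat := by
      have : ((r.toNat : Int)) ∣ ((q.toNat : Int)) := by
        rw [Int.toNat_of_nonneg (by omega : (0:Int) ≤ r), Int.toNat_of_nonneg (by omega : (0:Int) ≤ q)]
        exact hrd
      exact_mod_cast this
    rcases hp.eq_one_or_self_of_dvd _ hdvd with h1 | h1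
    · omega
    · have : r = q := by omega
      nlinarith
  · intro hno
    by_contra hnp
    have h1 : q.toNat ≠ 1 := by omega
    have hmf := Nat.minFac_prime h1
    have hsq := Nat.minFac_sq_le_self (by omega : 0 < q.toNat) hnp
    have hd : q.toNat.minFac ∣ q.toNat := Nat.minFac_dvd _
    apply hno
    refine ⟨(q.toNat.minFac : Int), by simpa using hmf, by exact_mod_cast hmf.two_le, ?_, ?_⟩
    · have : (q.toNat.minFac : Int) * (q.toNat.minFac : Int) ≤ (q.toNat : Int) := by
        exact_mod_cast (by nlinarith [hsq] : q.toNat.minFac * q.toNat.minFac ≤ q.toNat)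
      omega
    · have h2 : ((q.toNat.minFac : Int)) ∣ ((q.toNat : Int)) := Int.natCast_dvd_natCast.mpr hd
      rwa [Int.toNat_of_nonneg (by omega : (0:Int) ≤ q)] at h2

theorem prime_iff_no_lt_prime_dvd (q : Int) (hq : 2 ≤ q) :
    q.toNat.Prime ↔ ¬∃ r : Int, r.toNat.Prime ∧ 2 ≤ r ∧ r < q ∧ r ∣ q := by
  constructor
  · rintro hp ⟨r, hrp, hr2, hrq, hrd⟩
    have hdvd : r.toNat ∣ q.toNat := by
      have : ((r.toNat : Int)) ∣ ((q.toNat : Int)) := by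
        rw [Int.toNat_of_nonneg (by omega : (0:Int) ≤ r), Int.toNat_of_nonneg (by omega : (0:Int) ≤ q)]
        exact hrd
      exact_mod_cast this
    rcases hp.eq_one_or_self_of_dvd _ hdvd with h1 | h1 <;> omega
  · intro hno
    by_contra hnp
    rw [prime_iff_no_small_prime_dvd q hq] at hnp
    push Not at hnp
    obtain ⟨r, hrp, hr2, hrr, hrd⟩ := hnp
    exact hno ⟨r, hrp, hr2, by nlinarith, hrd⟩

theorem mem_primesTo (c m : Int) : m ∈ primesTo c ↔ 2 ≤ m ∧ m < c ∧ m.toNat.Prime := by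
  simp [primesTo, List.mem_filter, PySem.List.mem_pyRange_one]
  tauto

theorem primesTo_succ (q : Int) (hq : 2 ≤ q) :
    primesTo (q + 1) = primesTo q ++ (if q.toNat.Prime then [q] else []) := by
  unfold primesTo
  rw [PySem.List.pyRange_one_succ_right (by omega), List.filter_append]
  simp only [List.filter]
  split_ifs with h <;> simp_all

theorem primesTo_elems (c : Int) : ∀ r ∈ primesTo c, ∃ rn : Nat, r = (rn : Int) ∧ rn.Prime := by
  intro r hr
  rw [mem_primesTo] at hr
  exact ⟨r.toNat, by omega, hr.2.2⟩

theorem primesTo_nodup (c : Int) : (primesTo c).Nodup :=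
  (PySem.List.nodup_pyRange_one 2 c).filter _

theorem primesTo_sorted (c : Int) : (primesTo c).Pairwise (· ≤ ·) :=
  ((PySem.List.pairwise_lt_pyRange_one 2 c).filter _).imp le_of_lt

theorem trialOK_iff (q : Int) : ∀ l : List Int, (∀ r ∈ l, 0 ≤ r) → l.Pairwise (· ≤ ·) →
    (trialOK q l = true ↔ ∀ r ∈ l, r * r ≤ q → ¬ r ∣ q) := by
  intro l
  induction l with
  | nil => intro _ _; simp [trialOK]
  | cons r rest ih =>
    intro hpos hsorted
    rw [List.pairwise_cons] at hsorted
    have hr0 : 0 ≤ r := hpos r (by simp)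
    by_cases hbig : r * r > q
    · have hrw : trialOK q (r :: rest) = true := by simp [trialOK, hbig]
      rw [hrw]
      constructor
      · intro _ r' hr' hle
        exfalso
        rcases List.mem_cons.mp hr' with h | h
        · subst h; omega
        · have h1 : r ≤ r' := hsorted.1 r' h
          have h2 : r * r ≤ r' * r' := mul_le_mul h1 h1 hr0 (by omega)
          omega
      · intro _; rfl
    · by_cases hdvd : r ∣ q
      · have hrw : trialOK q (r :: rest) = false := by
          simp [trialOK, hbig, PySem.Int.mod_eq_zero_iff_dvd, hdvd]
        rw [hrw]
        simp only [Bool.false_eq_true, false_iff]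
        intro h
        exact h r (by simp) (by omega) hdvd
      · have hrw : trialOK q (r :: rest) = trialOK q rest := by
          simp [trialOK, hbig, PySem.Int.mod_eq_zero_iff_dvd, hdvd]
        rw [hrw]
        rw [ih (fun x hx => hpos x (by simp [hx])) hsorted.2]
        constructor
        · intro h r' hr' hle
          rcases List.mem_cons.mp hr' with h1 | h1
          · subst h1; exact hdvd
          · exact h r' h1 hle
        · intro h r' hr' hle
          exact h r' (by simp [hr']) hle

theorem trial_test_eq (q : Int) (hq : 2 ≤ q) :
    trialOK q (primesTo q) = decide q.toNat.Prime := by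
  have hpos : ∀ r ∈ primesTo q, 0 ≤ r := by
    intro r hr; rw [mem_primesTo] at hr; omega
  have hiff := trialOK_iff q (primesTo q) hpos (primesTo_sorted q)
  rcases h : decide q.toNat.Prime with _ | _
  · have hnp : ¬ q.toNat.Prime := by simpa using h
    rw [prime_iff_no_small_prime_dvd q hq] at hnp
    push Not at hnp
    obtain ⟨r, hrp, hr2, hrr, hrd⟩ := hnp
    have hrq : r < q := by nlinarith
    cases htk : trialOK q (primesTo q)
    · rfl
    · exfalso
      exact (hiff.mp htk) r ((mem_primesTo q r).mpr ⟨hr2, hrq, hrp⟩) hrr hrd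
  · have hp : q.toNat.Prime := of_decide_eq_true h
    apply hiff.mpr
    intro r hr hle hdvd
    rw [mem_primesTo] at hr
    rw [prime_iff_no_small_prime_dvd q hq] at hp
    exact hp ⟨r, hr.2.2, hr.1, hle, hdvd⟩

theorem trialB_gen (p : Int) : ∀ q primes, 2 ≤ q → q ≤ p + 1 → primes = primesTo q →
    trialB p q primes = primesTo (p + 1) := by
  intro q primes
  fun_induction trialB p q primes with
  | case1 q primes hqp htest ih =>
      intro h2 _ hpr
      subst hpr
      rw [trial_test_eq q h2] at htest
      apply ih (by omega) (by omega)
      rw [primesTo_succ q h2, if_pos (of_decide_eq_true htest)]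
  | case2 q primes hqp htest ih =>
      intro h2 _ hpr
      subst hpr
      rw [trial_test_eq q h2] at htest
      apply ih (by omega) (by omega)
      rw [primesTo_succ q h2]
      have : ¬ q.toNat.Prime := by simpa using htest
      simp [this]
  | case3 q primes hqp =>
      intro h2 hle hpr
      subst hpr
      have : q = p + 1 := by omega
      rw [this]

theorem trialB_eq (p : Int) : trialB p 2 [] = primesTo (p + 1) := by
  by_cases hp : 2 ≤ p + 1
  · apply trialB_gen p 2 [] (by omega) hp
    unfold primesTo
    rw [PySem.List.pyRange_one_eq_nil (by omega)]
    rfl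
  · unfold trialB primesTo
    rw [dif_neg (by omega), PySem.List.pyRange_one_eq_nil (by omega)]
    rfl

theorem foldl_pySetD_length (i : Int) (js : List Int) (s : List Int) :
    (js.foldl (fun t j => PySem.List.pySetD t j i) s).length = s.length := by
  induction js generalizing s with
  | nil => rfl
  | cons j js ih => simp [List.foldl_cons, ih, PySem.List.length_pySetD]

theorem foldl_pySetD_get (i : Int) (js : List Int) (m : Int) :
    ∀ s : List Int, (∀ j ∈ js, 0 ≤ j ∧ j < s.length) → 0 ≤ m → m < s.length →
    PySem.List.pyGetD (js.foldl (fun t j => PySem.List.pySetD t j i) s) m 0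
      = if m ∈ js then i else PySem.List.pyGetD s m 0 := by
  induction js with
  | nil => intro s _ _ _; simp
  | cons j js ih =>
    intro s hjs hm0 hm
    have hj := hjs j (by simp)
    have hlen : (PySem.List.pySetD s j i).length = s.length := PySem.List.length_pySetD s j i
    rw [List.foldl_cons, ih (PySem.List.pySetD s j i)
      (by intro x hx; rw [hlen]; exact hjs x (by simp [hx])) (by omega) (by omega)]
    rw [PySem.List.pySetD_of_nonneg s i hj.1]
    by_cases hmem : m ∈ js
    · simp [hmem]
    · simp only [hmem, if_false, List.mem_cons, or_false]
      rw [PySem.List.pyGetD_eq_getElem _ _ hm0 (by simpa [hlen] using hm),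
          PySem.List.pyGetD_eq_getElem _ _ hm0 (by omega)]
      · rw [List.getElem_set]
        by_cases hmj : m = j
        · simp [hmj]
        · have : j.toNat ≠ m.toNat := by omega
          simp [hmj, this]

theorem listpMark_length (nn i : Int) (s : List Int) :
    (listpMark nn i s).length = s.length := foldl_pySetD_length i _ s

theorem listpMark_get (nn i : Int) (s : List Int) (hi : 2 ≤ i)
    (hlen : (s.length : Int) = nn + 2) (m : Int) (hm0 : 0 ≤ m) (hm : m < nn + 2) :
    PySem.List.pyGetD (listpMark nn i s) m 0
      = if i ∣ m ∧ i ≤ m ∧ m ≤ nn then i else PySem.List.pyGetD s m 0 := by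
  unfold listpMark
  rw [foldl_pySetD_get i _ m s
        (by intro j hj; rw [PySem.List.mem_pyRange_iff_of_pos (by omega)] at hj; omega)
        (by omega) (by omega)]
  · congr 1
    simp only [eq_iff_iff]
    rw [PySem.List.mem_pyRange_iff_of_pos (by omega)]
    constructor
    · rintro ⟨h1, h2, h3⟩
      exact ⟨by simpa using dvd_add h3 (dvd_refl i), h1, by omega⟩
    · rintro ⟨h1, h2, h3⟩
      exact ⟨h2, by omega, dvd_sub h1 (dvd_refl i)⟩

theorem sieve_fold (nn : Int) (k : Int) (hk1 : 1 ≤ k) (hknn : k ≤ nn) :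
    (((PySem.List.pyRange 2 (k + 1) 1).foldl
        (fun (st : List Int × List Int) i =>
          if PySem.List.pyGetD st.1 i 0 == i then (listpMark nn i st.1, st.2 ++ [i]) else st)
        (PySem.List.pyRange 0 (nn + 2) 1, ([] : List Int))).2 = primesTo (k + 1)) ∧
    ((((PySem.List.pyRange 2 (k + 1) 1).foldl
        (fun (st : List Int × List Int) i =>
          if PySem.List.pyGetD st.1 i 0 == i then (listpMark nn i st.1, st.2 ++ [i]) else st)
        (PySem.List.pyRange 0 (nn + 2) 1, ([] : List Int))).1.length : Int) = nn + 2) ∧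
    (∀ m : Int, 0 ≤ m → m ≤ nn →
      (PySem.List.pyGetD ((PySem.List.pyRange 2 (k + 1) 1).foldl
        (fun (st : List Int × List Int) i =>
          if PySem.List.pyGetD st.1 i 0 == i then (listpMark nn i st.1, st.2 ++ [i]) else st)
        (PySem.List.pyRange 0 (nn + 2) 1, ([] : List Int))).1 m 0 = m ↔
        ¬∃ r : Int, r.toNat.Prime ∧ 2 ≤ r ∧ r ≤ k ∧ r < m ∧ r ∣ m)) := by
  revert hknn
  induction k, hk1 using Int.le_induction with
  | base =>
    intro _
    rw [show PySem.List.pyRange 2 (1 + 1) 1 = [] from PySem.List.pyRange_one_eq_nil (by omega)]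
    simp only [List.foldl_nil]
    refine ⟨by unfold primesTo; rw [PySem.List.pyRange_one_eq_nil (by omega)]; rfl, by
      simp [PySem.List.length_pyRange_one]; omega, ?_⟩
    intro m hm0 hmn
    rw [PySem.List.pyGetD_eq_getElem _ _ hm0 (by simp [PySem.List.length_pyRange_one]; omega)]
    rw [PySem.List.getElem_pyRange_one]
    constructor
    · intro _; rintro ⟨r, _, h2, h3, _, _⟩; omega
    · intro _; omega
  | succ k hk ih =>
    intro hknn'
    obtain ⟨iret, ilen, iget⟩ := ih (by omega)
    rw [show PySem.List.pyRange 2 (k + 1 + 1) 1 = PySem.List.pyRange 2 (k + 1) 1 ++ [k + 1] from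
      PySem.List.pyRange_one_succ_right (by omega), List.foldl_append]
    set st := (PySem.List.pyRange 2 (k + 1) 1).foldl
      (fun (st : List Int × List Int) i =>
        if PySem.List.pyGetD st.1 i 0 == i then (listpMark nn i st.1, st.2 ++ [i]) else st)
      (PySem.List.pyRange 0 (nn + 2) 1, ([] : List Int)) with hst
    have hnoprime_iff : (¬∃ r : Int, r.toNat.Prime ∧ 2 ≤ r ∧ r ≤ k ∧ r < k + 1 ∧ r ∣ k + 1) ↔
        (k + 1).toNat.Prime := by
      rw [prime_iff_no_lt_prime_dvd (k + 1) (by omega)]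
      constructor
      · rintro h ⟨r, h1, h2, h3, h4⟩; exact h ⟨r, h1, h2, by omega, by omega, h4⟩
      · rintro h ⟨r, h1, h2, h3, h4, h5⟩; exact h ⟨r, h1, h2, by omega, h5⟩
    have htest : (PySem.List.pyGetD st.1 (k + 1) 0 == k + 1) = decide ((k + 1).toNat.Prime) := by
      rcases hp : decide ((k + 1).toNat.Prime) with _ | _
      · simp only [beq_eq_false_iff_ne, ne_eq]
        rw [iget (k + 1) (by omega) (by omega), hnoprime_iff]
        simpa using hp
      · simp only [beq_iff_eq]
        rw [iget (k + 1) (by omega) (by omega), hnoprime_iff]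
        exact of_decide_eq_true hp
    simp only [List.foldl_cons, List.foldl_nil]
    by_cases hpr : (k + 1).toNat.Prime
    · rw [htest, if_pos (by simpa using hpr)]
      refine ⟨?_, ?_, ?_⟩
      · simp only
        rw [iret, primesTo_succ (k + 1) (by omega), if_pos hpr]
      · simpa [listpMark_length] using ilen
      · intro m hm0 hmn
        simp only
        rw [listpMark_get nn (k + 1) st.1 (by omega) ilen m hm0 (by omega)]
        split_ifs with hmark
        · by_cases hm : m = k + 1
          · subst hm
            constructor
            · intro _
              rintro ⟨r, h1, h2, h3, h4, h5⟩
              exact ((prime_iff_no_lt_prime_dvd (k + 1) (by omega)).mp hpr) ⟨r, h1, h2, h4, h5⟩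
            · intro _; rfl
          · constructor
            · intro h; exact absurd h.symm hm
            · intro h
              exact (h ⟨k + 1, hpr, by omega, by omega, by omega, hmark.1⟩).elim
        · rw [iget m hm0 hmn]
          constructor
          · rintro h ⟨r, h1, h2, h3, h4, h5⟩
            by_cases hr : r ≤ k
            · exact h ⟨r, h1, h2, hr, h4, h5⟩
            · have : r = k + 1 := by omega
              subst this
              exact hmark ⟨h5, by omega, hmn⟩
          · rintro h ⟨r, h1, h2, h3, h4, h5⟩
            exact h ⟨r, h1, h2, by omega, h4, h5⟩
    · rw [htest, if_neg (by simpa using hpr)]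
      refine ⟨?_, ilen, ?_⟩
      · rw [iret, primesTo_succ (k + 1) (by omega), if_neg hpr, List.append_nil]
      · intro m hm0 hmn
        rw [iget m hm0 hmn]
        constructor
        · rintro h ⟨r, h1, h2, h3, h4, h5⟩
          by_cases hr : r ≤ k
          · exact h ⟨r, h1, h2, hr, h4, h5⟩
          · have : r = k + 1 := by omega
            subst this
            exact hpr h1
        · rintro h ⟨r, h1, h2, h3, h4, h5⟩
          exact h ⟨r, h1, h2, by omega, h4, h5⟩

theorem listpA_eq (p : Int) : listpA p = primesTo (p + 1) := by
  by_cases hp : 2 ≤ p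
  · exact (sieve_fold p p (by omega) (by omega)).1
  · unfold listpA
    rw [show PySem.List.pyRange 2 (p + 1) 1 = [] from PySem.List.pyRange_one_eq_nil (by omega)]
    unfold primesTo
    rw [show PySem.List.pyRange 2 (p + 1) 1 = [] from PySem.List.pyRange_one_eq_nil (by omega)]
    rfl

theorem innerA_mem (v : List Int) (i n : Int) (hv : v.Pairwise (· ≤ ·)) (hi : 1 ≤ i) :
    ∀ m, m ∈ innerA v i n ↔ ∃ j ∈ v, m = j * i ∧ j * i ≤ n := by
  induction v with
  | nil => simp [innerA]
  | cons j rest ih =>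
    intro m
    rw [List.pairwise_cons] at hv
    by_cases hle : j * i ≤ n
    · simp only [innerA, if_pos hle, List.mem_cons, ih hv.2]
      constructor
      · rintro (h | ⟨j', hj', h1, h2⟩)
        · exact ⟨j, by simp, h, hle⟩
        · exact ⟨j', by simp [hj'], h1, h2⟩
      · rintro ⟨j', hj', h1, h2⟩
        rcases hj' with h | h
        · subst h; exact Or.inl h1
        · exact Or.inr ⟨j', h, h1, h2⟩
    · simp only [innerA, if_neg hle, List.not_mem_nil, false_iff]
      rintro ⟨j', hj', h1, h2⟩
      rcases List.mem_cons.mp hj' with h | h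
      · subst h; exact hle h2
      · have : j ≤ j' := hv.1 j' h
        nlinarith
theorem innerA_eq (v : List Int) (i n : Int) :
    innerA v i n = (v.takeWhile (fun j => decide (j * i ≤ n))).map (· * i) := by
  induction v with
  | nil => rfl
  | cons j rest ih =>
    by_cases h : j * i ≤ n
    · simp [innerA, h, ih]
    · simp [innerA, h]

theorem powLoopA_mem (v : List Int) (n q : Int) (hq : 2 ≤ q)
    (hv : v.Pairwise (· ≤ ·)) (hvpos : ∀ j ∈ v, 1 ≤ j) :
    ∀ i, 1 ≤ i → ∀ m, m ∈ powLoopA v n q i ↔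
      ∃ t : ℕ, ∃ j ∈ v, m = j * (i * q ^ t) ∧ m ≤ n := by
  intro i
  fun_induction powLoopA v n q i with
  | case1 i h ih =>
    intro _ m
    rw [List.mem_append, innerA_mem v i n hv (by omega), ih (by nlinarith [h.1, h.2.1])]
    constructor
    · rintro (⟨j, hj, h1, h2⟩ | ⟨t, j, hj, h1, h2⟩)
      · exact ⟨0, j, hj, by simpa using h1, by omega⟩
      · exact ⟨t + 1, j, hj, by rw [h1]; ring, h2⟩
    · rintro ⟨t, j, hj, h1, h2⟩
      cases t with
      | zero => exact Or.inl ⟨j, hj, by simpa using h1, by simp at h1; omega⟩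
      | succ t => exact Or.inr ⟨t, j, hj, by rw [h1]; ring, h2⟩
  | case2 i h =>
    intro hi m
    simp only [List.not_mem_nil, false_iff]
    rintro ⟨t, j, hj, h1, h2⟩
    have hjj := hvpos j hj
    have hqt : (1:Int) ≤ q ^ t := one_le_pow₀ (by omega)
    have hni : ¬ i ≤ n := by tauto
    have h3 : i ≤ i * q ^ t := le_mul_of_one_le_right (by omega) hqt
    have h4 : i * q ^ t ≤ j * (i * q ^ t) := le_mul_of_one_le_left (by nlinarith) hjj
    linarith [h1.ge, h1.le]

theorem powLoopA_nodup (v : List Int) (n q : Int) (hq : 2 ≤ q)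
    (hv : v.Pairwise (· < ·)) (hvpos : ∀ j ∈ v, 1 ≤ j) (hnd : ∀ j ∈ v, ¬ q ∣ j) :
    ∀ i, 1 ≤ i → (powLoopA v n q i).Nodup := by
  have hvle : v.Pairwise (· ≤ ·) := hv.imp le_of_lt
  intro i
  fun_induction powLoopA v n q i with
  | case1 i h ih =>
    intro _
    rw [List.nodup_append]
    refine ⟨?_, ih (by nlinarith [h.2.1]), ?_⟩
    · rw [innerA_eq]
      apply List.Nodup.map
      · intro a b hab
        exact mul_right_cancel₀ (by omega) hab
      · exact ((List.takeWhile_sublist _).nodup) hv.nodup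
    · intro a ha b hb hab
      subst hab
      obtain ⟨j, hj, h1, _⟩ := (innerA_mem v i n hvle (by omega) a).mp ha
      obtain ⟨t, j', hj', h2, _⟩ :=
        (powLoopA_mem v n q hq hvle hvpos (i * q) (by nlinarith [h.2.1]) a).mp hb
      have key : j * i = (j' * q ^ (t + 1)) * i := by
        calc j * i = a := h1.symm
          _ = j' * (i * q * q ^ t) := h2
          _ = (j' * q ^ (t + 1)) * i := by ring
      have hjq : j = j' * q ^ (t + 1) := mul_right_cancel₀ (by omega) key
      exact hnd j hj ⟨j' * q ^ t, by rw [hjq]; ring⟩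
  | case2 i h =>
    intro _; simp

theorem stepA (n q : Int) (qn : ℕ) (hqe : q = (qn : Int)) (hqp : qn.Prime)
    (qs v : List Int) (hqnot : q ∉ qs) (hInv : InvA n qs v) :
    InvA n (qs ++ [q])
      (PySem.List.sorted (v ++ powLoopA v n q q) (fun x => x) false) := by
  obtain ⟨hsort, hmem⟩ := hInv
  have h2q : 2 ≤ q := by rw [hqe]; exact_mod_cast hqp.two_le
  have hvpos : ∀ j ∈ v, 1 ≤ j := by
    intro j hj; rcases (hmem j).mp hj with h | h <;> omega
  have hvle : v.Pairwise (· ≤ ·) := hsort.imp le_of_lt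
  have hndq : ∀ j ∈ v, ¬ q ∣ j := by
    intro j hj hdvd
    rcases (hmem j).mp hj with h | h
    · subst h
      have := Int.le_of_dvd (by omega) hdvd
      omega
    · exact hqnot (hqe ▸ h.2.2 qn hqp (hqe ▸ hdvd))
  have memnew : ∀ m, m ∈ powLoopA v n q q ↔
      ∃ t : ℕ, ∃ j ∈ v, m = j * (q * q ^ t) ∧ m ≤ n :=
    powLoopA_mem v n q h2q hvle hvpos q (by omega)
  have hndX : (v ++ powLoopA v n q q).Nodup := by
    rw [List.nodup_append]
    refine ⟨hsort.nodup, powLoopA_nodup v n q h2q hsort hvpos hndq q (by omega), ?_⟩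
    intro a ha b hb hab
    subst hab
    obtain ⟨t, j, hj, h1, _⟩ := (memnew a).mp hb
    exact hndq a ha ⟨j * q ^ t, by rw [h1]; ring⟩
  have memX : ∀ m, m ∈ v ++ powLoopA v n q q ↔
      (m = 1 ∨ (2 ≤ m ∧ m ≤ n ∧ SmoothOver (qs ++ [q]) m)) := by
    intro m
    rw [List.mem_append, hmem m, memnew m]
    constructor
    · rintro ((h | ⟨h1, h2, h3⟩) | ⟨t, j, hj, h1, h2⟩)
      · exact Or.inl h
      · exact Or.inr ⟨h1, h2, fun r hr hd => List.mem_append_left _ (h3 r hr hd)⟩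
      · refine Or.inr ⟨?_, h2, ?_⟩
        · have hj1 := hvpos j hj
          have hqt : (1:Int) ≤ q ^ t := one_le_pow₀ (by omega)
          have hb1 : q ≤ q * q ^ t := le_mul_of_one_le_right (by omega) hqt
          have hb2 : q * q ^ t ≤ j * (q * q ^ t) := le_mul_of_one_le_left (by nlinarith) hj1
          linarith [h1.le, h1.ge]
        · intro r hr hd
          rw [h1] at hd
          have hrp : Prime ((r : ℕ) : Int) := Nat.prime_iff_prime_int.mp hr
          rcases (hrp.dvd_mul.mp hd) with hd1 | hd1
          · rcases (hmem j).mp hj with hje | hje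
            · exfalso
              rw [hje] at hd1
              have := Int.le_of_dvd (by omega) hd1
              have := hr.two_le
              omega
            · exact List.mem_append_left _ (hje.2.2 r hr hd1)
          · have : ((r : ℕ) : Int) ∣ q ^ (t + 1) := by
              rw [pow_succ']
              exact hd1
            have hrq : (r : Int) = q := by
              rw [hqe] at this ⊢
              have : r ∣ qn ^ (t + 1) := by exact_mod_cast this
              have := hr.dvd_of_dvd_pow this
              exact_mod_cast congrArg (Nat.cast : ℕ → ℤ)
                ((Nat.prime_dvd_prime_iff_eq hr hqp).mp this)
            rw [hrq]
            exact List.mem_append_right _ (by simp)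
    · rintro (h | ⟨h1, h2, h3⟩)
      · exact Or.inl (Or.inl h)
      · -- decompose m by the q-adic valuation
        set M := m.toNat with hM
        have hMpos : M ≠ 0 := by omega
        have hmM : (M : Int) = m := by omega
        obtain ⟨e, j, hMe, hnotd⟩ : ∃ e j, qn ^ e * j = M ∧ ¬ qn ∣ j :=
          ⟨_, _, Nat.ordProj_mul_ordCompl_eq_self M qn, Nat.not_dvd_ordCompl hqp hMpos⟩
        have hjpos : 1 ≤ j := by
          rcases Nat.eq_zero_or_pos j with h0 | h0
          · exfalso; rw [h0] at hMe; simp at hMe; exact hMpos hMe.symm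
          · omega
        have hjZmem : ((j : ℕ) : Int) ∈ v := by
          rw [hmem]
          have hjle : (j : Int) ≤ n := by
            have : j ≤ M := Nat.le_of_dvd (by omega) (Dvd.intro_left _ hMe)
            omega
          have hsm : SmoothOver qs (j : Int) := by
            intro r hr hd
            have hrdm : (r : Int) ∣ m := by
              refine dvd_trans hd ?_
              rw [← hmM]
              exact_mod_cast Dvd.intro_left _ hMe
            rcases List.mem_append.mp (h3 r hr hrdm) with h | h
            · exact h
            · exfalso
              simp at h
              rw [h, hqe] at hd
              exact hnotd (by exact_mod_cast hd)
          rcases Nat.lt_or_ge j 2 with hj2 | hj2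
          · left; omega
          · right; exact ⟨by exact_mod_cast hj2, hjle, hsm⟩
        cases e with
        | zero =>
          left
          have hMj : M = j := by simpa using hMe.symm
          rw [← hmM, hMj]
          exact (hmem _).mp hjZmem
        | succ t =>
          right
          refine ⟨t, (j : Int), hjZmem, ?_, h2⟩
          rw [← hmM, ← hMe, hqe]
          push_cast
          ring
  constructor
  · have hperm := PySem.List.sorted_perm (v ++ powLoopA v n q q) (fun x => x) false
    have hle := PySem.List.sorted_pairwise (v ++ powLoopA v n q q) (fun x => x)
    have hnd : (PySem.List.sorted (v ++ powLoopA v n q q) (fun x => x) false).Nodup :=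
      hperm.nodup_iff.mpr hndX
    exact (hle.and hnd).imp (fun h => lt_of_le_of_ne h.1 h.2)
  · intro m
    rw [PySem.List.mem_sorted, memX m]

theorem foldA (n : Int) : ∀ (rest qs v : List Int),
    (∀ r ∈ rest, ∃ rn : ℕ, r = (rn : Int) ∧ rn.Prime) → rest.Nodup →
    (∀ r ∈ rest, r ∉ qs) → InvA n qs v →
    InvA n (qs ++ rest)
      (rest.foldl (fun v q => PySem.List.sorted (v ++ powLoopA v n q q) (fun x => x) false) v) := by
  intro rest
  induction rest with
  | nil => intro qs v _ _ _ h; simpa using h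
  | cons q rest ih =>
    intro qs v hpr hnd hnotin hInv
    obtain ⟨qn, hqe, hqp⟩ := hpr q (by simp)
    rw [List.foldl_cons]
    have hstep := stepA n q qn hqe hqp qs v (hnotin q (by simp)) hInv
    have := ih (qs ++ [q]) _
      (fun r hr => hpr r (by simp [hr]))
      (List.nodup_cons.mp hnd).2
      (fun r hr => by
        simp only [List.mem_append, List.mem_singleton]
        rintro (h | h)
        · exact hnotin r (by simp [hr]) h
        · subst h; exact (List.nodup_cons.mp hnd).1 hr)
      hstep
    simpa using this

theorem tailB_mem (primes : List Int) (n : Int)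
    (hpr : ∀ r ∈ primes, ∃ rn : Nat, r = (rn : Int) ∧ rn.Prime)
    (hsorted : primes.Pairwise (· ≤ ·)) :
    ∀ (i : Nat) (val : Int), 1 ≤ val → ∀ m,
      m ∈ tailB primes n i val ↔
        ∃ s : Int, m = val * s ∧ 2 ≤ s ∧ m ≤ n ∧ SmoothOver (primes.drop i) s := by
  intro i val
  fun_induction tailB primes n i val with
  | case1 i val hlt hc ih1 ih2 =>
    intro hval m
    obtain ⟨pn, hpe, hpp⟩ := hpr primes[i] (List.getElem_mem hlt)
    have hp2 : 2 ≤ primes[i] := hc.2.2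
    have hdrop : primes.drop i = primes[i] :: primes.drop (i + 1) := List.drop_eq_getElem_cons hlt
    have hreq : ∀ r : ℕ, r.Prime → (r : Int) ∣ primes[i] → (r : Int) = primes[i] := by
      intro r hr hd
      rw [hpe] at hd ⊢
      have : r ∣ pn := by exact_mod_cast hd
      exact_mod_cast congrArg (Nat.cast : ℕ → ℤ)
        ((Nat.prime_dvd_prime_iff_eq hr hpp).mp this)
    simp only [List.mem_append, List.mem_cons]
    rw [ih1 (by nlinarith [hc.2.1]), ih2 hval]
    constructor
    · rintro ((h | ⟨s', h1, h2, h3, h4⟩) | ⟨s, h1, h2, h3, h4⟩)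
      · refine ⟨primes[i], h, hp2, h ▸ hc.1, ?_⟩
        intro r hr hd
        rw [hreq r hr hd, hdrop]
        exact List.mem_cons.mpr (Or.inl rfl)
      · refine ⟨primes[i] * s', by rw [h1]; ring, by nlinarith, h3, ?_⟩
        intro r hr hd
        have hrp : Prime ((r : ℕ) : Int) := Nat.prime_iff_prime_int.mp hr
        rcases hrp.dvd_mul.mp hd with hd1 | hd1
        · rw [hreq r hr hd1, hdrop]
          exact List.mem_cons.mpr (Or.inl rfl)
        · exact h4 r hr hd1
      · refine ⟨s, h1, h2, h3, ?_⟩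
        intro r hr hd
        rw [hdrop]
        exact List.mem_cons_of_mem _ (h4 r hr hd)
    · rintro ⟨s, h1, h2, h3, h4⟩
      by_cases hdd : primes[i] ∣ s
      · obtain ⟨cc, hcc⟩ := hdd
        have hccpos : 1 ≤ cc := by
          by_contra hcon
          have h0 : primes[i] * cc ≤ 0 :=
            mul_nonpos_of_nonneg_of_nonpos (by omega) (by omega)
          linarith [hcc.le, hcc.ge]
        rcases eq_or_lt_of_le hccpos with hc1 | hc2
        · left; left
          rw [h1, hcc, ← hc1]; ring
        · left; right
          refine ⟨cc, by rw [h1, hcc]; ring, by omega, h3, ?_⟩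
          intro r hr hd
          exact h4 r hr (hd.trans ⟨primes[i], by rw [hcc]; ring⟩)
      · right
        refine ⟨s, h1, h2, h3, ?_⟩
        intro r hr hd
        have := h4 r hr hd
        rw [hdrop] at this
        rcases List.mem_cons.mp this with h | h
        · exact absurd (h ▸ hd) hdd
        · exact h
  | case2 i val hlt hc =>
    intro hval m
    obtain ⟨pn, hpe, hpp⟩ := hpr primes[i] (List.getElem_mem hlt)
    have hp2 : 2 ≤ primes[i] := by rw [hpe]; exact_mod_cast hpp.two_le
    have hgt : ¬ val * primes[i] ≤ n := by tauto
    have hdrop : primes.drop i = primes[i] :: primes.drop (i + 1) := List.drop_eq_getElem_cons hlt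
    have hheadle : ∀ x ∈ primes.drop i, primes[i] ≤ x := by
      intro x hx
      have hd2 : (primes.drop i).Pairwise (· ≤ ·) := hsorted.sublist (List.drop_sublist i primes)
      rw [hdrop] at hd2 hx
      rcases List.mem_cons.mp hx with h | h
      · omega
      · exact (List.pairwise_cons.mp hd2).1 x h
    simp only [List.not_mem_nil, false_iff]
    rintro ⟨s, h1, h2, h3, h4⟩
    have h5 : (s.toNat.minFac : Int) ∣ s := by
      have hd : s.toNat.minFac ∣ s.toNat := Nat.minFac_dvd _
      have h6 : ((s.toNat.minFac : ℕ) : Int) ∣ ((s.toNat : ℕ) : Int) := by exact_mod_cast hd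
      rwa [Int.toNat_of_nonneg (by omega : (0:Int) ≤ s)] at h6
    have hmemr := h4 s.toNat.minFac (Nat.minFac_prime (by omega)) h5
    have hle1 : primes[i] ≤ (s.toNat.minFac : Int) := hheadle _ hmemr
    have hle2 : (s.toNat.minFac : Int) ≤ s := Int.le_of_dvd (by omega) h5
    apply hgt
    calc val * primes[i] ≤ val * s := mul_le_mul_of_nonneg_left (by omega) (by omega)
      _ = m := h1.symm
      _ ≤ n := h3
  | case3 i val hlt =>
    intro hval m
    simp only [List.not_mem_nil, false_iff]
    rintro ⟨s, h1, h2, h3, h4⟩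
    have h5 : (s.toNat.minFac : Int) ∣ s := by
      have hd : s.toNat.minFac ∣ s.toNat := Nat.minFac_dvd _
      have h6 : ((s.toNat.minFac : ℕ) : Int) ∣ ((s.toNat : ℕ) : Int) := by exact_mod_cast hd
      rwa [Int.toNat_of_nonneg (by omega : (0:Int) ≤ s)] at h6
    have := h4 s.toNat.minFac (Nat.minFac_prime (by omega)) h5
    rw [List.drop_eq_nil_of_le (by omega)] at this
    simp at this

theorem tailB_nodup (primes : List Int) (n : Int)
    (hpr : ∀ r ∈ primes, ∃ rn : Nat, r = (rn : Int) ∧ rn.Prime)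
    (hsorted : primes.Pairwise (· ≤ ·)) (hnd : primes.Nodup) :
    ∀ (i : Nat) (val : Int), 1 ≤ val → (tailB primes n i val).Nodup := by
  intro i val
  fun_induction tailB primes n i val with
  | case1 i val hlt hc ih1 ih2 =>
    intro hval
    obtain ⟨pn, hpe, hpp⟩ := hpr primes[i] (List.getElem_mem hlt)
    have hdrop : primes.drop i = primes[i] :: primes.drop (i + 1) := List.drop_eq_getElem_cons hlt
    have hdnd : (primes.drop i).Nodup := (List.drop_sublist i primes).nodup hnd
    have hpnotin : primes[i] ∉ primes.drop (i + 1) := by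
      rw [hdrop] at hdnd
      exact (List.nodup_cons.mp hdnd).1
    rw [List.nodup_append]
    refine ⟨?_, ih2 hval, ?_⟩
    · rw [List.nodup_cons]
      refine ⟨?_, ih1 (by nlinarith [hc.2.1, hc.2.2])⟩
      intro hmem
      obtain ⟨s', h1, h2, _, _⟩ :=
        (tailB_mem primes n hpr hsorted i (val * primes[i])
          (by nlinarith [hc.2.1, hc.2.2]) _).mp hmem
      have hb2 : 2 ≤ val * primes[i] := by nlinarith [hc.2.1, hc.2.2]
      have hmul : val * primes[i] * 2 ≤ val * primes[i] * s' :=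
        mul_le_mul_of_nonneg_left h2 (by omega)
      linarith [h1.le, h1.ge]
    · intro a ha b hb hab
      subst hab
      obtain ⟨t, h1t, h2t, h3t, h4t⟩ :
          ∃ s : Int, a = val * s ∧ 2 ≤ s ∧ a ≤ n ∧ primes[i] ∣ s := by
        rcases List.mem_cons.mp ha with h | h
        · exact ⟨primes[i], h, hc.2.2, h ▸ hc.1, dvd_refl _⟩
        · obtain ⟨s', h1, h2, h3, _⟩ :=
            (tailB_mem primes n hpr hsorted i (val * primes[i])
              (by nlinarith [hc.2.1, hc.2.2]) _).mp h
          exact ⟨primes[i] * s', by rw [h1]; ring, by nlinarith [hc.2.2], h3,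
            Dvd.intro _ rfl⟩
      obtain ⟨s, g1, g2, g3, g4⟩ :=
        (tailB_mem primes n hpr hsorted (i + 1) val hval _).mp hb
      have hst : t = s := by
        have : val * t = val * s := h1t.symm.trans g1
        exact mul_left_cancel₀ (by omega) this
      subst hst
      have : (pn : Int) ∈ primes.drop (i + 1) := by
        apply g4 pn hpp
        rw [← hpe]
        exact h4t
      rw [← hpe] at this
      exact hpnotin this
  | case2 i val hlt hc =>
    intro _; simp
  | case3 i val hlt =>
    intro _; simp

theorem gen_smooth_inv (n p : Int) : InvA n (primesTo (p + 1)) (gen_smooth n p) := by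
  have hbase : InvA n [] [1] := by
    constructor
    · simp
    · intro m
      simp only [List.mem_singleton]
      constructor
      · intro h; exact Or.inl h
      · rintro (h | ⟨h1, h2, h3⟩)
        · exact h
        · exfalso
          have h5 : (m.toNat.minFac : Int) ∣ m := by
            have hd : m.toNat.minFac ∣ m.toNat := Nat.minFac_dvd _
            have h6 : ((m.toNat.minFac : ℕ) : Int) ∣ ((m.toNat : ℕ) : Int) := by exact_mod_cast hd
            rwa [Int.toNat_of_nonneg (by omega : (0:Int) ≤ m)] at h6
          have := h3 m.toNat.minFac (Nat.minFac_prime (by omega)) h5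
          simp at this
  have := foldA n (primesTo (p + 1)) [] [1] (primesTo_elems (p + 1)) (primesTo_nodup (p + 1))
    (by simp) hbase
  unfold gen_smooth
  rw [listpA_eq]
  simpa using this

-- ===== VERDICT (by name: the statement is the Claim_ definition above) =====
theorem gen_smooth_spec : Claim_equal_gen_smooth := by
  unfold Claim_equal_gen_smooth
  intro n p _
  unfold Spec_gen_smooth gen_smooth_alt
  rw [trialB_eq]
  obtain ⟨hsort, hmem⟩ := gen_smooth_inv n p
  have hprB := primesTo_elems (p + 1)
  have hndB := primesTo_nodup (p + 1)
  have hX : ∀ m : Int, m ∈ (1 : Int) :: tailB (primesTo (p + 1)) n 0 1 ↔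
      (m = 1 ∨ (2 ≤ m ∧ m ≤ n ∧ SmoothOver (primesTo (p + 1)) m)) := by
    intro m
    rw [List.mem_cons, tailB_mem (primesTo (p + 1)) n hprB (primesTo_sorted (p + 1)) 0 1 (by omega) m]
    simp only [List.drop_zero, one_mul]
    constructor
    · rintro (h | ⟨s, h1, h2, h3, h4⟩)
      · exact Or.inl h
      · subst h1; exact Or.inr ⟨h2, h3, h4⟩
    · rintro (h | ⟨h1, h2, h3⟩)
      · exact Or.inl h
      · exact Or.inr ⟨m, rfl, h1, h2, h3⟩
  have hndX : ((1 : Int) :: tailB (primesTo (p + 1)) n 0 1).Nodup := by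
    rw [List.nodup_cons]
    refine ⟨?_, tailB_nodup (primesTo (p + 1)) n hprB (primesTo_sorted (p + 1)) hndB 0 1 (by omega)⟩
    intro hmem1
    obtain ⟨s, h1, h2, _, _⟩ :=
      (tailB_mem (primesTo (p + 1)) n hprB (primesTo_sorted (p + 1)) 0 1 (by omega) 1).mp hmem1
    omega
  have hperm : (gen_smooth n p).Perm ((1 : Int) :: tailB (primesTo (p + 1)) n 0 1) := by
    apply List.perm_of_nodup_nodup_toFinset_eq hsort.nodup hndX
    apply Finset.ext
    intro a
    rw [List.mem_toFinset, List.mem_toFinset, hmem a, hX a]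
  exact (PySem.List.sorted_eq_of_perm_of_pairwise_lt _ _ _ hperm hsort).symm
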